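-- pv_equiv track=rewrite | github.com/lukasnascky/python_ulbra | 2nd Semester/aula10/funcoes.py | decodificar_frase
-- ===== SOURCE A (Python) =====
-- def decodificar_frase(frase):
--     frase = frase[-1] + frase[1:-1] + frase[0]
--     nova_frase = ''
--     for i in reversed(range(len(frase))):
--         nova_frase += frase[i]
--     nova_frase2 =''
--     for i in nova_frase:
--         nova_frase2 += chr(ord(i) - 3)
--     return nova_frase2
-- ===== SOURCE B (Python) =====
-- def decodificar_frase(frase):
--     # swapping the ends then reversing the whole string = keep ends, reverse the middle
--     pre = frase[0] + frase[1:-1][::-1] + frase[-1]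
--     return ''.join(chr(ord(c) - 3) for c in pre)
-- ===== Notes on version B (the rewrite author's own statement) =====
-- stated objective: simpler
-- what changed: B replaces A's end-swap plus index-loop full reversal plus separate char-by-char shift loop with a partial reversal of the middle (first/last kept in place, which equals reversing the swapped string) and one fused join/map pass for the -3 shift.
import Mathlib
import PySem

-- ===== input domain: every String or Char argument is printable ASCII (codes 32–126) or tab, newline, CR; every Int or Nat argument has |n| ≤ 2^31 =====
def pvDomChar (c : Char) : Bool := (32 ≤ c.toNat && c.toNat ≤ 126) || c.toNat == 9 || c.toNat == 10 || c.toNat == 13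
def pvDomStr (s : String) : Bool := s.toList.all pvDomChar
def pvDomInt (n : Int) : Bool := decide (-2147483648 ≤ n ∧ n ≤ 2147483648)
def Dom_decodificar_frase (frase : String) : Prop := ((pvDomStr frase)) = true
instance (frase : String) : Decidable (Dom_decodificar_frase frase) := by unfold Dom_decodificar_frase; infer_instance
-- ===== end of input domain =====

-- B keeps the first/last characters in place and reverses only the middle (equal to A's
-- end-swap followed by a full reversal), fusing the -3 shift into one map pass; objective: simpler.


-- ===== PORT A =====
def decodificar_frase (frase : String) : String :=
  -- frase = frase[-1] + frase[1:-1] + frase[0]  (IndexError on "" is excluded by Pre_)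
  match PySem.List.pyGet? frase.toList (-1), PySem.List.pyGet? frase.toList 0 with
  | some last, some first =>
    let f2 : List Char := [last] ++ PySem.List.slice frase.toList (some 1) (some (-1)) ++ [first]
    -- for i in reversed(range(len(frase))): nova_frase += frase[i]  (i always in range, so pyGetD is exact)
    let nova : List Char :=
      ((PySem.List.pyRange 0 (f2.length : Int) 1).reverse).foldl
        (fun acc i => acc ++ [PySem.List.pyGetD f2 i ' ']) []
    -- for i in nova_frase: nova_frase2 += chr(ord(i) - 3)
    let nova2 : List Char := nova.foldl (fun acc c => acc ++ [Char.ofNat (c.toNat - 3)]) []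
    String.ofList nova2
  | _, _ => ""

-- ===== PORT B =====
def decodificar_frase_alt (frase : String) : String :=
  -- pre = frase[0] + frase[1:-1][::-1] + frase[-1]  (the [::-1] library slice is list reversal)
  match PySem.List.pyGet? frase.toList 0 with
  | none => ""
  | some first =>
    match PySem.List.pyGet? frase.toList (-1) with
    | none => ""
    | some last =>
      let pre : List Char :=
        first :: (PySem.List.slice frase.toList (some 1) (some (-1))).reverse ++ [last]
      -- ''.join(chr(ord(c) - 3) for c in pre)
      String.ofList (pre.map (fun c => Char.ofNat (c.toNat - 3)))

-- ===== PRECONDITION & SPEC =====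
-- Python A raises IndexError on the empty string (frase[-1]); excluded here. A is total otherwise.
def Pre_decodificar_frase (frase : String) : Prop := frase ≠ ""
instance (frase : String) : Decidable (Pre_decodificar_frase frase) := by
  unfold Pre_decodificar_frase; infer_instance
def pvWitness_decodificar_frase : String := "abc"

def Spec_decodificar_frase (frase : String) (out : String) : Prop := out = decodificar_frase_alt frase
instance (frase : String) (out : String) : Decidable (Spec_decodificar_frase frase out) := by unfold Spec_decodificar_frase; infer_instance

-- ===== CLAIM (what is proved, stated in full; the proofs are below) =====
def Claim_equal_decodificar_frase : Prop := ∀ (frase : String), Dom_decodificar_frase frase → Pre_decodificar_frase frase → Spec_decodificar_frase frase (decodificar_frase frase)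

-- ===== LEMMAS AND PROOFS =====

-- A's index loop over reversed(range(len(f2))) builds exactly f2.reverse
theorem pv_loop_reverse (f2 : List Char) :
    ((PySem.List.pyRange 0 (f2.length : Int) 1).reverse).foldl
      (fun acc i => acc ++ [PySem.List.pyGetD f2 i ' ']) [] = f2.reverse := by
  rw [PySem.List.foldl_append_singleton_eq_map, List.map_reverse]
  rw [PySem.List.map_pyGetD_pyRange_zero']
  simp

-- ===== VERDICT (by name: the statement is the Claim_ definition above) =====
theorem decodificar_frase_spec : Claim_equal_decodificar_frase := by
  intro frase _ hpre
  unfold Spec_decodificar_frase decodificar_frase decodificar_frase_alt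
  have hne : frase.toList ≠ [] := by
    intro h
    exact hpre (String.toList_inj.mp (by simp [h]))
  obtain ⟨x, xs, hl⟩ := List.exists_cons_of_ne_nil hne
  rw [hl]
  rw [PySem.List.pyGet?_neg_one]
  have hlast : (x :: xs).getLast? = some ((x :: xs).getLast (by simp)) := by
    simp [List.getLast?_eq_some_getLast]
  rw [hlast, PySem.List.pyGet?_zero_cons]
  simp only
  rw [pv_loop_reverse, PySem.List.foldl_append_singleton_eq_map]
  simp
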